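-- pv_equiv track=rewrite | github.com/freakeye/education | filling a square matrix/clockwise_spiral_matrix.py | get_Path_Lengths
-- ===== SOURCE A (Python) =====
-- def get_Path_Lengths(n):
--     pathL = list()
--     if n > 1:
--         s = 0
--         q = 1
--         while s < n**2:
--             for i in range(2):
--                 pathL.append(q)
--                 s = s + q
--                 if s >= n**2:
--                     break
--             q += 1
--     else:
--         pathL = [1]
--     pathL.reverse()
--     return pathL
-- ===== SOURCE B (Python) =====
-- def get_Path_Lengths(n):
--     # Closed form: the spiral segment lengths are [n, n-1, n-1, ..., 1, 1] for n > 1.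
--     if n <= 1:
--         return [1]
--     result = [n]
--     for k in range(n - 1, 0, -1):
--         result.append(k)
--         result.append(k)
--     return result
-- ===== Notes on version B (the rewrite author's own statement) =====
-- stated objective: simpler
-- what changed: Replaces A's simulation (running sum compared with n**2, inner 2-step loop with break, final reverse) by directly emitting the known pattern [n, n-1, n-1, ..., 1, 1] in one descending pass with no sum, break or reversal.
import Mathlib
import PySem

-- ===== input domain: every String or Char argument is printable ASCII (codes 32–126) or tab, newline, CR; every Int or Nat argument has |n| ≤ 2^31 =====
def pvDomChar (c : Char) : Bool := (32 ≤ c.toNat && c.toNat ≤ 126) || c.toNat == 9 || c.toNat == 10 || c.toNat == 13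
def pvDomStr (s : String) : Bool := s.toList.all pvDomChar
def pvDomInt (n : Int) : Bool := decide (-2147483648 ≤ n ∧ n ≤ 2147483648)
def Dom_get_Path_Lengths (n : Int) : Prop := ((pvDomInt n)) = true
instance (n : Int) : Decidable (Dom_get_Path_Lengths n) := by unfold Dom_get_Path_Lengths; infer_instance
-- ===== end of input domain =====

-- B replaces A's running-sum simulation by directly emitting the pattern [n, n-1, n-1, ..., 1, 1] (simpler; same cost).

-- ===== PORT A =====
-- A's while/for-with-break loop: state (s, q, acc); the '1 ≤ q' conjunct is a totality
-- guard only (Python always has q ≥ 1 here), it never changes the computed value.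
def pvLoopA (n2 s q : Int) (acc : List Int) : List Int :=
  if _h : s < n2 ∧ 1 ≤ q then
    if s + q ≥ n2 then
      -- first append, s reaches n²: break, q += 1, while-condition fails
      pvLoopA n2 (s + q) (q + 1) (acc ++ [q])
    else
      -- both appends of the inner range(2) loop, then q += 1
      pvLoopA n2 (s + q + q) (q + 1) (acc ++ [q, q])
  else acc
termination_by (n2 - s).toNat
decreasing_by all_goals omega

def get_Path_Lengths (n : Int) : List Int :=
  (if n > 1 then pvLoopA (n ^ 2) 0 1 [] else [1]).reverse

-- ===== PORT B =====
def get_Path_Lengths_alt (n : Int) : List Int :=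
  if n ≤ 1 then [1]
  else (PySem.List.pyRange (n - 1) 0 (-1)).foldl (fun acc k => acc ++ [k, k]) [n]

-- ===== PRECONDITION & SPEC =====
def Spec_get_Path_Lengths (n : Int) (out : List Int) : Prop := out = get_Path_Lengths_alt n
instance (n : Int) (out : List Int) : Decidable (Spec_get_Path_Lengths n out) := by unfold Spec_get_Path_Lengths; infer_instance

-- ===== CLAIM (what is proved, stated in full; the proofs are below) =====
def Claim_equal_get_Path_Lengths : Prop := ∀ (n : Int), Dom_get_Path_Lengths n → Spec_get_Path_Lengths n (get_Path_Lengths n)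

-- ===== LEMMAS AND PROOFS =====

-- ascending list A builds before reversing: [n-k, n-k, ..., n-1, n-1, n]
def pvAsc : Nat → Int → List Int
  | 0, n => [n]
  | k + 1, n => (n - k - 1) :: (n - k - 1) :: pvAsc k n

-- descending pair list: [m, m, m-1, m-1, ..., m-c+1, m-c+1]
def pvD : Nat → Int → List Int
  | 0, _ => []
  | c + 1, m => pvD c m ++ [m - c, m - c]

theorem pvLoopA_eq (k : Nat) : ∀ (n : Int) (acc : List Int), 2 ≤ n → (k : Int) ≤ n - 1 →
    pvLoopA (n ^ 2) ((n - k - 1) * (n - k)) (n - k) acc = acc ++ pvAsc k n := by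
  induction k with
  | zero =>
    intro n acc h2 _
    simp only [Nat.cast_zero, sub_zero]
    have h1 : (n - 1) * n < n ^ 2 ∧ 1 ≤ n := ⟨by nlinarith, by omega⟩
    have hb : (n - 1) * n + n ≥ n ^ 2 := by nlinarith
    have hstop : ¬((n - 1) * n + n < n ^ 2 ∧ 1 ≤ n + 1) := by intro h; nlinarith [h.1]
    rw [pvLoopA, dif_pos h1, if_pos hb, pvLoopA, dif_neg hstop]
    simp [pvAsc]
  | succ k ih =>
    intro n acc h2 hk
    have hkc : (k : Int) + 1 ≤ n - 1 := by push_cast at hk; omega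
    have hq1 : (1 : Int) ≤ n - (k + 1 : Nat) := by push_cast; omega
    have h1 : (n - (k + 1 : Nat) - 1) * (n - (k + 1 : Nat)) < n ^ 2 ∧ 1 ≤ n - (k + 1 : Nat) := by
      refine ⟨?_, hq1⟩
      have : (n : Int) - (k + 1 : Nat) ≤ n - 1 := by push_cast; omega
      nlinarith
    have hnb : ¬((n - (k + 1 : Nat) - 1) * (n - (k + 1 : Nat)) + (n - (k + 1 : Nat)) ≥ n ^ 2) := by
      intro h
      have hle : (n : Int) - (k + 1 : Nat) ≤ n - 1 := by push_cast; omega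
      nlinarith
    rw [pvLoopA, dif_pos h1, if_neg hnb]
    have harg : (n - (k + 1 : Nat) - 1) * (n - (k + 1 : Nat)) + (n - (k + 1 : Nat)) + (n - (k + 1 : Nat))
        = (n - (k : Nat) - 1) * (n - (k : Nat)) := by push_cast; ring
    have harg2 : n - ((k : Nat) + 1 : Nat) + 1 = n - (k : Nat) := by push_cast; ring
    rw [harg, harg2, ih n _ h2 (by omega)]
    simp only [pvAsc, List.append_assoc, List.cons_append, List.nil_append]
    have : (n : Int) - (k + 1 : Nat) = n - (k : Nat) - 1 := by push_cast; ring
    rw [this]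

theorem pvAsc_reverse (k : Nat) (n : Int) : (pvAsc k n).reverse = n :: pvD k (n - 1) := by
  induction k with
  | zero => simp [pvAsc, pvD]
  | succ k ih =>
    simp only [pvAsc, pvD, List.reverse_cons, ih]
    have : (n : Int) - k - 1 = n - 1 - k := by ring
    simp [this]

theorem pvFoldB (c : Nat) : ∀ (m : Int) (acc : List Int),
    ((List.range c).map (fun j : Nat => m + (-1) * (j : Int))).foldl (fun acc k => acc ++ [k, k]) acc
      = acc ++ pvD c m := by
  induction c with
  | zero => intro m acc; simp [pvD]
  | succ c ih =>
    intro m acc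
    rw [List.range_succ, List.map_append, List.foldl_append, ih]
    simp only [pvD, List.map_cons, List.map_nil, List.foldl_cons, List.foldl_nil, List.append_assoc]
    have : m + -(c : Int) = m - c := by ring
    simp [this]

theorem pyRange_down (n : Int) (h : 2 ≤ n) :
    PySem.List.pyRange (n - 1) 0 (-1)
      = (List.range (n - 1).toNat).map (fun j : Nat => (n - 1) + (-1) * (j : Int)) := by
  rw [PySem.List.pyRange]
  rw [if_neg (by norm_num)]
  have hc : ((if 0 < (-1 : Int) then if n - 1 < 0 then ((0 - (n - 1) + -1 - 1) / -1).toNat else 0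
      else if (0 : Int) < n - 1 then ((n - 1 - 0 + -(-1) - 1) / -(-1)).toNat else 0)) = (n - 1).toNat := by
    rw [if_neg (by norm_num), if_pos (by omega)]
    norm_num
  rw [hc]

theorem get_Path_Lengths_eq_alt (n : Int) : get_Path_Lengths n = get_Path_Lengths_alt n := by
  unfold get_Path_Lengths get_Path_Lengths_alt
  by_cases h : n > 1
  · rw [if_pos h, if_neg (by omega)]
    have h2 : 2 ≤ n := by omega
    have hL := pvLoopA_eq (n - 1).toNat n [] h2 (by omega)
    have e1 : (n : Int) - ((n - 1).toNat : Int) = 1 := by omega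
    rw [e1] at hL
    norm_num at hL
    rw [hL, pvAsc_reverse, pyRange_down n h2, pvFoldB]
    simp
  · rw [if_neg h, if_pos (by omega)]
    simp

-- ===== VERDICT (by name: the statement is the Claim_ definition above) =====
theorem get_Path_Lengths_spec : Claim_equal_get_Path_Lengths := by
  intro n _
  exact get_Path_Lengths_eq_alt n
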